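-- pv_equiv track=rewrite | github.com/alenny/leetcode-python3 | src/best-meeting-point.py | findPoint
-- ===== SOURCE A (Python) =====
-- def findPoint(grid):
--     rows = len(grid)
--     cols = len(grid[0])
--     countsByRow = [0 for r in range(rows)]
--     countsByCol = [0 for c in range(cols)]
--     totalOnes = 0
--     for r in range(rows):
--         for c in range(cols):
--             if grid[r][c] == 1:
--                 countsByRow[r] += 1
--                 countsByCol[c] += 1
--                 totalOnes += 1
--     prevSum, targetRow = countsByRow[0], 0
--     for r in range(1, rows):
--         if prevSum - (totalOnes - prevSum) >= 0:
--             break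
--         targetRow = r
--         prevSum += countsByRow[r]
--     prevSum, targetCol = countsByCol[0], 0
--     for c in range(1, cols):
--         if prevSum - (totalOnes - prevSum) >= 0:
--             break
--         targetCol = c
--         prevSum += countsByCol[c]
--     return targetRow, targetCol
-- ===== SOURCE B (Python) =====
-- def findPoint(grid):
--     rows, cols = len(grid), len(grid[0])
--     rowPos = [r for r in range(rows) for c in range(cols) if grid[r][c] == 1]
--     colPos = [c for c in range(cols) for r in range(rows) if grid[r][c] == 1]
--     n = len(rowPos)
--     if n == 0:
--         return 0, 0
--     k = (n - 1) // 2
--     return rowPos[k], colPos[k]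
-- ===== Notes on version B (the rewrite author's own statement) =====
-- stated objective: simpler
-- what changed: Replaces the two mutated histogram arrays and the two cumulative-sum break loops with two explicitly sorted coordinate lists (row-major and column-major) from which the lower-median element is read off directly by index.
import Mathlib
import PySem

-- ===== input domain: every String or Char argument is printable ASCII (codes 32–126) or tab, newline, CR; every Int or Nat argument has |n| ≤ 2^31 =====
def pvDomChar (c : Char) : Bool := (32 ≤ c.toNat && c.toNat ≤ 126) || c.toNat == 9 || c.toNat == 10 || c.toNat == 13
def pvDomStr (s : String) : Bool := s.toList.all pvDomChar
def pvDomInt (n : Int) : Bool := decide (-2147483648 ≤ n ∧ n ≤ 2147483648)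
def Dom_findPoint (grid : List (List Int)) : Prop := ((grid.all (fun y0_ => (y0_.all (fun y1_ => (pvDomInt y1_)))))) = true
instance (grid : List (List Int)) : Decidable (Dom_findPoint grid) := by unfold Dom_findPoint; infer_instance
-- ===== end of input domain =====

-- B replaces A's two mutated histogram arrays and cumulative-sum break loops by two sorted
-- coordinate lists indexed at the lower median (objective: simpler).

-- ===== PORT A =====
-- helper: the 'for r in range(1, rows): if …: break; target = r; prevSum += counts[r]' loop
def scanLoopA (counts : List Int) (total : Int) : List Int → Int × Int → Int × Int
  | [], st => st
  | r :: rs, st =>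
    if st.1 - (total - st.1) ≥ 0 then st
    else scanLoopA counts total rs (st.1 + PySem.List.pyGetD counts r 0, r)

def findPoint (grid : List (List Int)) : Int × Int :=
  let rows : Int := PySem.List.len grid
  let cols : Int := PySem.List.len (PySem.List.pyGetD grid 0 [])
  let st := (PySem.List.pyRange 0 rows 1).foldl (fun st r =>
      (PySem.List.pyRange 0 cols 1).foldl (fun st c =>
        if PySem.List.pyGetD (PySem.List.pyGetD grid r []) c 0 = 1 then
          (PySem.List.pySetD st.1 r (PySem.List.pyGetD st.1 r 0 + 1),
           PySem.List.pySetD st.2.1 c (PySem.List.pyGetD st.2.1 c 0 + 1),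
           st.2.2 + 1)
        else st) st)
      ((PySem.List.pyRange 0 rows 1).map (fun _ => (0:Int)),
       (PySem.List.pyRange 0 cols 1).map (fun _ => (0:Int)), (0:Int))
  let targetRow := (scanLoopA st.1 st.2.2 (PySem.List.pyRange 1 rows 1)
      (PySem.List.pyGetD st.1 0 0, 0)).2
  let targetCol := (scanLoopA st.2.1 st.2.2 (PySem.List.pyRange 1 cols 1)
      (PySem.List.pyGetD st.2.1 0 0, 0)).2
  (targetRow, targetCol)

-- ===== PORT B =====
def findPoint_alt (grid : List (List Int)) : Int × Int :=
  let rows : Int := PySem.List.len grid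
  let cols : Int := PySem.List.len (PySem.List.pyGetD grid 0 [])
  let rowPos := (PySem.List.pyRange 0 rows 1).flatMap (fun r =>
      (PySem.List.pyRange 0 cols 1).filterMap (fun c =>
        if PySem.List.pyGetD (PySem.List.pyGetD grid r []) c 0 = 1 then some r else none))
  let colPos := (PySem.List.pyRange 0 cols 1).flatMap (fun c =>
      (PySem.List.pyRange 0 rows 1).filterMap (fun r =>
        if PySem.List.pyGetD (PySem.List.pyGetD grid r []) c 0 = 1 then some c else none))
  let n : Int := PySem.List.len rowPos
  if n = 0 then (0, 0)
  else
    let k := PySem.Int.floordiv (n - 1) 2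
    (PySem.List.pyGetD rowPos k 0, PySem.List.pyGetD colPos k 0)

-- ===== PRECONDITION & SPEC =====
-- Pre_ excludes exactly the inputs where Python A raises IndexError: the empty grid, a grid
-- whose first row is empty (countsByCol[0] fails), and grids with a row shorter than row 0.
def Pre_findPoint (grid : List (List Int)) : Prop :=
  grid ≠ [] ∧ grid.getD 0 [] ≠ [] ∧ ∀ row ∈ grid, (grid.getD 0 []).length ≤ row.length
instance (grid : List (List Int)) : Decidable (Pre_findPoint grid) := by
  unfold Pre_findPoint; infer_instance

def pvWitness_findPoint : List (List Int) := [[1, 0, 2], [0, 1, 1]]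

def Spec_findPoint (grid : List (List Int)) (out : Int × Int) : Prop := out = findPoint_alt grid
instance (grid : List (List Int)) (out : Int × Int) : Decidable (Spec_findPoint grid out) := by
  unfold Spec_findPoint; infer_instance

-- ===== CLAIM (what is proved, stated in full; the proofs are below) =====
def Claim_equal_findPoint : Prop :=
  ∀ (grid : List (List Int)), Dom_findPoint grid → Pre_findPoint grid →
    Spec_findPoint grid (findPoint grid)

-- ===== LEMMAS AND PROOFS =====

def cntP (P : Int → Int → Prop) [∀ r c, Decidable (P r c)] (N : Nat) (r : Int) : Nat :=
  (PySem.List.pyRange 0 (N : Int) 1).countP (fun c => decide (P r c))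
def prefF (f : Nat → Nat) : Nat → Nat
  | 0 => 0
  | a + 1 => prefF f a + f a

theorem cntP_succ (P : Int → Int → Prop) [∀ r c, Decidable (P r c)] (N : Nat) (r : Int) :
    cntP P (N + 1) r = cntP P N r + (if P r (N : Int) then 1 else 0) := by
  unfold cntP
  rw [show ((N + 1 : Nat) : Int) = (N : Int) + 1 by push_cast; ring,
      PySem.List.pyRange_one_succ_right (by positivity), List.countP_append]
  rw [List.countP_singleton]
  by_cases h : P r (N : Int) <;> simp [h]

theorem cntP_eq_sum (P : Int → Int → Prop) [∀ r c, Decidable (P r c)] (N : Nat) (r : Int) :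
    cntP P N r = ∑ c ∈ Finset.range N, (if P r (c : Int) then 1 else 0) := by
  induction N with
  | zero => simp [cntP]
  | succ n ih => rw [cntP_succ, Finset.sum_range_succ, ih]

theorem prefF_eq_sum (f : Nat → Nat) (a : Nat) :
    prefF f a = ∑ i ∈ Finset.range a, f i := by
  induction a with
  | zero => simp [prefF]
  | succ n ih => rw [prefF, Finset.sum_range_succ, ih]

theorem double_count (P : Int → Int → Prop) [∀ r c, Decidable (P r c)] (M N : Nat) :
    prefF (fun i => cntP P N (i : Int)) M = prefF (fun j => cntP (fun a b => P b a) M (j : Int)) N := by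
  rw [prefF_eq_sum, prefF_eq_sum]
  simp only [cntP_eq_sum]
  exact Finset.sum_comm

theorem filterMap_replicate (P : Int → Prop) [∀ c, Decidable (P c)] (N : Nat) (r : Int) :
    (PySem.List.pyRange 0 (N : Int) 1).filterMap (fun c => if P c then some r else none)
      = List.replicate ((PySem.List.pyRange 0 (N : Int) 1).countP (fun c => decide (P c))) r := by
  induction N with
  | zero => simp
  | succ n ih =>
    rw [show ((n + 1 : Nat) : Int) = (n : Int) + 1 by push_cast; ring,
        PySem.List.pyRange_one_succ_right (by positivity), List.filterMap_append, List.countP_append, ih]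
    rw [List.countP_singleton]
    by_cases h : P (n : Int) <;> simp [h, List.replicate_succ']

theorem map_range_set {β : Type} (f : Nat → β) (M i : Nat) (v : β) (_h : i < M) :
    ((List.range M).map f).set i v
      = (List.range M).map (fun i' => if i' = i then v else f i') := by
  apply List.ext_getElem
  · simp
  · intro j hj hj2
    have hjm : j < M := by simpa using hj
    rw [List.getElem_set, List.getElem_map, List.getElem_map]
    simp only [List.getElem_range]
    by_cases hij : i = j
    · simp [hij]
    · rw [if_neg hij, if_neg (show ¬ j = i from fun hji => hij hji.symm)]

theorem inner_fold (P : Int → Int → Prop) [∀ r c, Decidable (P r c)]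
    (M N : Nat) (J : Nat) (hJ : J ≤ N) (rN : Nat) (hr : rN < M)
    (fR fC : Nat → Int) (tot : Int) :
    (PySem.List.pyRange 0 (J : Int) 1).foldl (fun st c =>
        if P (rN : Int) c then
          (PySem.List.pySetD st.1 (rN : Int) (PySem.List.pyGetD st.1 (rN : Int) 0 + 1),
           PySem.List.pySetD st.2.1 c (PySem.List.pyGetD st.2.1 c 0 + 1),
           st.2.2 + 1)
        else st)
      ((List.range M).map fR, (List.range N).map fC, tot)
    = ((List.range M).map (fun i => if i = rN then fR i + (cntP P J (rN : Int) : Int) else fR i),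
       (List.range N).map (fun j => fC j + if (j : Int) < (J : Int) ∧ P (rN : Int) (j : Int) then 1 else 0),
       tot + (cntP P J (rN : Int) : Int)) := by
  induction J with
  | zero =>
    simp only [Nat.cast_zero, PySem.List.pyRange_one_eq_nil (le_refl 0), List.foldl_nil]
    refine Prod.ext ?_ (Prod.ext ?_ ?_) <;> simp [cntP]
  | succ J ih =>
    have hJN : J ≤ N := Nat.le_of_succ_le hJ
    rw [show ((J + 1 : Nat) : Int) = (J : Int) + 1 by push_cast; ring,
        PySem.List.pyRange_one_succ_right (by positivity), List.foldl_append, ih hJN,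
        List.foldl_cons, List.foldl_nil]
    by_cases hp : P (rN : Int) (J : Int)
    · rw [if_pos hp]
      simp only [PySem.List.pyGetD_natCast, PySem.List.pySetD_natCast,
        PySem.List.getD_map_range _ _ _ _ hr, PySem.List.getD_map_range _ _ _ _ (by omega : J < N),
        map_range_set _ _ _ _ hr, map_range_set _ _ _ _ (by omega : J < N)]
      refine Prod.ext ?_ (Prod.ext ?_ ?_)
      · refine List.map_congr_left (fun i hi => ?_)
        by_cases h : i = rN <;> (simp [h, cntP_succ, hp]; try ring)
      · refine List.map_congr_left (fun j hj => ?_)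
        by_cases h : j = J
        · subst h; simp [hp]
        · have hne : ¬ ((j:Int) = (J:Int)) := by exact_mod_cast h
          simp only [if_neg h]
          by_cases hlt : (j:Int) < (J:Int)
          · have h2 : (j:Int) < (J:Int) + 1 := by omega
            simp [hlt, h2]
          · have h2 : ¬ ((j:Int) < (J:Int) + 1) := by omega
            simp [hlt, h2]
      · simp [cntP_succ, hp]; ring
    · rw [if_neg hp]
      refine Prod.ext ?_ (Prod.ext ?_ ?_)
      · simp [cntP_succ, hp]
      · refine List.map_congr_left (fun j hj => ?_)
        by_cases h : (j:Int) = (J:Int)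
        · simp [h, hp]
        · by_cases hlt : (j:Int) < (J:Int)
          · have : (j:Int) < (J:Int) + 1 := by omega
            simp [hlt, this]
          · have h2 : ¬ ((j:Int) < (J:Int) + 1) := by omega
            simp [hlt, h2]
      · simp [cntP_succ, hp]

theorem outer_fold (P : Int → Int → Prop) [∀ r c, Decidable (P r c)]
    (M N : Nat) (U : Nat) (hU : U ≤ M) :
    (PySem.List.pyRange 0 (U : Int) 1).foldl (fun st r =>
        (PySem.List.pyRange 0 (N : Int) 1).foldl (fun st c =>
          if P r c then
            (PySem.List.pySetD st.1 r (PySem.List.pyGetD st.1 r 0 + 1),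
             PySem.List.pySetD st.2.1 c (PySem.List.pyGetD st.2.1 c 0 + 1),
             st.2.2 + 1)
          else st) st)
      ((List.range M).map (fun _ => (0 : Int)), (List.range N).map (fun _ => (0 : Int)), (0 : Int))
    = ((List.range M).map (fun i => if i < U then (cntP P N (i : Int) : Int) else 0),
       (List.range N).map (fun (j : Nat) => (cntP (fun a b => P b a) U (j : Int) : Int)),
       (prefF (fun i => cntP P N (i : Int)) U : Int)) := by
  induction U with
  | zero => simp [cntP, prefF]
  | succ U ih =>
    have hUM : U ≤ M := Nat.le_of_succ_le hU
    rw [show ((U + 1 : Nat) : Int) = (U : Int) + 1 by push_cast; ring,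
        PySem.List.pyRange_one_succ_right (by positivity), List.foldl_append, ih hUM,
        List.foldl_cons, List.foldl_nil,
        inner_fold P M N N (le_refl N) U (by omega) _ _ _]
    refine Prod.ext ?_ (Prod.ext ?_ ?_)
    · refine List.map_congr_left (fun i hi => ?_)
      by_cases h : i = U
      · subst h; simp
      · have h1 : (i < U) ↔ (i < U + 1) := by omega
        simp [h, h1]
    · refine List.map_congr_left (fun j hj => ?_)
      have hjN : j < N := by simpa using hj
      have hlt : (j : Int) < (N : Int) := by exact_mod_cast hjN
      simp [hlt, cntP_succ]
    · simp [prefF]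

theorem le_prefF (f : Nat → Nat) : ∀ a i, i < a → f i ≤ prefF f a := by
  intro a
  induction a with
  | zero => omega
  | succ a ih =>
    intro i hi
    have hp : prefF f (a + 1) = prefF f a + f a := rfl
    by_cases h : i = a
    · subst h; omega
    · have := ih i (by omega); omega

def pick2f (TN : Nat) (f : Nat → Nat) : Nat → Nat → Nat → Nat
  | 0, a, _ => a - 1
  | s + 1, a, p => if TN ≤ 2 * p then a - 1 else pick2f TN f s (a + 1) (p + f a)

def pickIdx (f : Nat → Nat) : Nat → Nat → Nat → Nat
  | 0, i, _ => i
  | s + 1, i, j => if j < f i then i else pickIdx f s (i + 1) (j - f i)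

theorem scan_eq_pick2f (f : Nat → Nat) (M TN : Nat) :
    ∀ (steps a p : Nat), 1 ≤ a → a + steps = M →
    (scanLoopA ((List.range M).map (fun i => (f i : Int))) (TN : Int)
        (PySem.List.pyRange (a : Int) (M : Int) 1) ((p : Int), (a : Int) - 1)).2
      = (pick2f TN f steps a p : Int) := by
  intro steps
  induction steps with
  | zero =>
    intro a p h1 hM
    have : a = M := by omega
    subst this
    rw [PySem.List.pyRange_one_eq_nil (le_refl _)]
    simp [scanLoopA, pick2f]
    omega
  | succ s ih =>
    intro a p h1 hM
    have haM : (a : Int) < (M : Int) := by exact_mod_cast (by omega : a < M)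
    rw [PySem.List.pyRange_one_cons haM]
    by_cases hc : TN ≤ 2 * p
    · have hcI : (p : Int) - ((TN : Int) - (p : Int)) ≥ 0 := by omega
      simp only [scanLoopA, if_pos hcI, pick2f, if_pos hc]
      omega
    · have hcI : ¬ ((p : Int) - ((TN : Int) - (p : Int)) ≥ 0) := by omega
      simp only [scanLoopA, if_neg hcI, pick2f, if_neg hc]
      have hga : PySem.List.pyGetD ((List.range M).map (fun i => (f i : Int))) (a : Int) 0
          = (f a : Int) := by
        rw [PySem.List.pyGetD_natCast, PySem.List.getD_map_range _ _ _ _ (by omega : a < M)]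
      rw [hga]
      have := ih (a + 1) (p + f a) (by omega) (by omega)
      rw [show ((a : Int) + 1) = ((a + 1 : Nat) : Int) by push_cast; ring,
          show ((p : Int) + (f a : Int)) = ((p + f a : Nat) : Int) by push_cast; ring,
          show (a : Int) = ((a + 1 : Nat) : Int) - 1 by push_cast; ring]
      exact this

theorem pick2f_eq_pickIdx (f : Nat → Nat) (M TN k : Nat) (hT : TN = prefF f M) (h1 : 1 ≤ TN)
    (hk : k = (TN - 1) / 2) :
    ∀ (steps a : Nat), 1 ≤ a → a + steps = M → prefF f (a - 1) ≤ k →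
    pick2f TN f steps a (prefF f a) = pickIdx f (steps + 1) (a - 1) (k - prefF f (a - 1)) := by
  intro steps
  induction steps with
  | zero =>
    intro a ha hM hpre
    have haM : a = M := by omega
    subst haM
    have hsp : prefF f a = prefF f (a - 1) + f (a - 1) := by
      conv_lhs => rw [show a = (a - 1) + 1 by omega]
      rfl
    have hcond : k - prefF f (a - 1) < f (a - 1) := by omega
    simp [pick2f, pickIdx, hcond]
  | succ s ih =>
    intro a ha hM hpre
    have hsp : prefF f a = prefF f (a - 1) + f (a - 1) := by
      conv_lhs => rw [show a = (a - 1) + 1 by omega]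
      rfl
    by_cases hc : TN ≤ 2 * prefF f a
    · have hk2 : k < prefF f a := by omega
      have hcond : k - prefF f (a - 1) < f (a - 1) := by omega
      simp [pick2f, pickIdx, hc, hcond]
    · have hk2 : prefF f a ≤ k := by omega
      have hcond : ¬ (k - prefF f (a - 1) < f (a - 1)) := by omega
      rw [show pick2f TN f (s + 1) a (prefF f a)
            = if TN ≤ 2 * prefF f a then a - 1 else pick2f TN f s (a + 1) (prefF f a + f a) from rfl,
          if_neg hc,
          show pickIdx f (s + 1 + 1) (a - 1) (k - prefF f (a - 1))
            = if k - prefF f (a - 1) < f (a - 1) then a - 1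
              else pickIdx f (s + 1) (a - 1 + 1) (k - prefF f (a - 1) - f (a - 1)) from rfl,
          if_neg hcond,
          show prefF f a + f a = prefF f (a + 1) from rfl,
          show a - 1 + 1 = a by omega,
          show k - prefF f (a - 1) - f (a - 1) = k - prefF f a by omega]
      have := ih (a + 1) (by omega) (by omega) (by simpa using hk2)
      simpa using this

theorem pos_len (g : Int → List Int) (f : Nat → Nat) (M : Nat)
    (hg : ∀ i : Nat, i < M → g (i : Int) = List.replicate (f i) (i : Int)) :
    ∀ (steps a : Nat), a + steps = M →
    prefF f a + ((PySem.List.pyRange (a : Int) (M : Int) 1).flatMap g).length = prefF f M := by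
  intro steps
  induction steps with
  | zero =>
    intro a hM
    have : a = M := by omega
    subst this
    rw [PySem.List.pyRange_one_eq_nil (le_refl _)]
    simp
  | succ s ih =>
    intro a hM
    have haM : (a : Int) < (M : Int) := by exact_mod_cast (by omega : a < M)
    rw [PySem.List.pyRange_one_cons haM, List.flatMap_cons, List.length_append,
        hg a (by omega), List.length_replicate,
        show ((a : Int) + 1) = ((a + 1 : Nat) : Int) by push_cast; ring]
    have := ih (a + 1) (by omega)
    have hp : prefF f (a + 1) = prefF f a + f a := rfl
    omega

theorem pos_get (g : Int → List Int) (f : Nat → Nat) (M : Nat)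
    (hg : ∀ i : Nat, i < M → g (i : Int) = List.replicate (f i) (i : Int)) :
    ∀ (steps a j : Nat), a + steps = M → prefF f a + j < prefF f M →
    ((PySem.List.pyRange (a : Int) (M : Int) 1).flatMap g).getD j 0 = (pickIdx f steps a j : Int) := by
  intro steps
  induction steps with
  | zero =>
    intro a j hM hj
    have : a = M := by omega
    subst this
    omega
  | succ s ih =>
    intro a j hM hj
    have haM : (a : Int) < (M : Int) := by exact_mod_cast (by omega : a < M)
    rw [PySem.List.pyRange_one_cons haM, List.flatMap_cons, hg a (by omega),
        show ((a : Int) + 1) = ((a + 1 : Nat) : Int) by push_cast; ring]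
    rw [show pickIdx f (s + 1) a j
          = if j < f a then a else pickIdx f s (a + 1) (j - f a) from rfl]
    by_cases hc : j < f a
    · rw [if_pos hc]
      rw [List.getD_eq_getElem?_getD, List.getElem?_append_left (by simpa using hc)]
      simp [hc]
    · rw [if_neg hc]
      rw [List.getD_eq_getElem?_getD,
          List.getElem?_append_right (by simpa using (Nat.le_of_not_lt hc)),
          List.length_replicate, ← List.getD_eq_getElem?_getD]
      have hp : prefF f (a + 1) = prefF f a + f a := rfl
      exact ih (a + 1) (j - f a) (by omega) (by omega)

theorem findPoint_eq_alt (grid : List (List Int)) (hne : grid ≠ [])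
    (hrow0 : grid.getD 0 [] ≠ []) : findPoint grid = findPoint_alt grid := by
  have hM1 : 1 ≤ grid.length := List.length_pos_iff.mpr hne
  have hN1 : 1 ≤ (grid.getD 0 []).length := List.length_pos_iff.mpr hrow0
  simp only [findPoint, findPoint_alt, PySem.List.len_eq, PySem.List.pyGetD_zero]
  rw [show ((PySem.List.pyRange 0 (grid.length : Int) 1).map (fun _ => (0:Int)))
        = (List.range grid.length).map (fun _ => (0:Int)) by
      rw [PySem.List.pyRange_zero_nat, List.map_map]; rfl,
      show ((PySem.List.pyRange 0 ((grid.getD 0 []).length : Int) 1).map (fun _ => (0:Int)))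
        = (List.range (grid.getD 0 []).length).map (fun _ => (0:Int)) by
      rw [PySem.List.pyRange_zero_nat, List.map_map]; rfl,
      outer_fold (fun r c => PySem.List.pyGetD (PySem.List.pyGetD grid r []) c 0 = 1)
        grid.length (grid.getD 0 []).length grid.length (le_refl _)]
  set M := grid.length with hMdef
  set N := (grid.getD 0 []).length with hNdef
  set P : Int → Int → Prop := fun r c => PySem.List.pyGetD (PySem.List.pyGetD grid r []) c 0 = 1
    with hPdef
  set fRow : Nat → Nat := fun i => cntP P N (i : Int) with hfRow
  set fCol : Nat → Nat := fun j => cntP (fun a b => P b a) M (j : Int) with hfCol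
  set TN := prefF fRow M with hTN
  simp only []
  rw [show (List.range M).map (fun i => if i < M then (cntP P N (i : Int) : Int) else 0)
        = (List.range M).map (fun i => (fRow i : Int)) from
      List.map_congr_left (fun i hi => by simp [List.mem_range.mp hi, hfRow])]
  have hgR : ∀ i : Nat, i < M →
      (fun r => List.filterMap (fun c => if P r c then some r else none)
        (PySem.List.pyRange 0 (N : Int) 1)) (i : Int) = List.replicate (fRow i) (i : Int) :=
    fun i _ => filterMap_replicate (P (i : Int)) N (i : Int)
  have hgC : ∀ j : Nat, j < N →
      (fun c => List.filterMap (fun r => if P r c then some c else none)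
        (PySem.List.pyRange 0 (M : Int) 1)) (j : Int) = List.replicate (fCol j) (j : Int) :=
    fun j _ => filterMap_replicate (fun r => P r (j : Int)) M (j : Int)
  have hTNcol : TN = prefF fCol N := by
    rw [hTN, hfRow, hfCol]; exact double_count P M N
  have hlen : ((PySem.List.pyRange 0 (M : Int) 1).flatMap
      (fun r => List.filterMap (fun c => if P r c then some r else none)
        (PySem.List.pyRange 0 (N : Int) 1))).length = TN := by
    have := pos_len (fun r => List.filterMap (fun c => if P r c then some r else none)
        (PySem.List.pyRange 0 (N : Int) 1)) fRow M hgR M 0 (by omega)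
    simp only [prefF, Nat.cast_zero] at this
    omega
  have hgd0R : (List.map (fun i => ((fRow i : Nat) : Int)) (List.range M)).getD 0 0
      = ((fRow 0 : Nat) : Int) := PySem.List.getD_map_range _ _ _ _ (by omega)
  have hgd0C : (List.map (fun j => ((fCol j : Nat) : Int)) (List.range N)).getD 0 0
      = ((fCol 0 : Nat) : Int) := PySem.List.getD_map_range _ _ _ _ (by omega)
  rw [show (List.map (fun (j : Nat) => ((cntP (fun a b => P b a) M (j : Int) : Nat) : Int)) (List.range N))
        = List.map (fun j => ((fCol j : Nat) : Int)) (List.range N) from rfl]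
  rw [hgd0R, hgd0C, hlen]
  by_cases hTN0 : TN = 0
  · have hR0 : fRow 0 = 0 := by have := le_prefF fRow M 0 (by omega); omega
    have hC0 : fCol 0 = 0 := by
      have := le_prefF fCol N 0 (by omega); omega
    rw [if_pos (by simp [hTN0])]
    refine Prod.ext ?_ ?_
    · rcases h : PySem.List.pyRange 1 (M : Int) 1 with _ | ⟨x, xs⟩ <;>
        simp [scanLoopA, hR0, hTN0]
    · rcases h : PySem.List.pyRange 1 (N : Int) 1 with _ | ⟨x, xs⟩ <;>
        simp [scanLoopA, hC0, hTN0]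
  · have hTN1 : 1 ≤ TN := Nat.pos_of_ne_zero hTN0
    set k := (TN - 1) / 2 with hk
    have hkTN : k < TN := by omega
    rw [if_neg (by exact_mod_cast hTN0)]
    have hfd : PySem.Int.floordiv ((TN : Int) - 1) 2 = (k : Int) := by
      rw [show ((TN : Int) - 1) = ((TN - 1 : Nat) : Int) by omega]
      exact_mod_cast PySem.Int.floordiv_natCast (TN - 1) 2
    rw [hfd]
    have hBrow : PySem.List.pyGetD ((PySem.List.pyRange 0 (M : Int) 1).flatMap
        (fun r => List.filterMap (fun c => if P r c then some r else none)
          (PySem.List.pyRange 0 (N : Int) 1))) (k : Int) 0 = ((pickIdx fRow M 0 k : Nat) : Int) := by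
      rw [PySem.List.pyGetD_natCast]
      have := pos_get (fun r => List.filterMap (fun c => if P r c then some r else none)
          (PySem.List.pyRange 0 (N : Int) 1)) fRow M hgR M 0 k (by omega)
        (by simp only [prefF]; omega)
      simpa using this
    have hBcol : PySem.List.pyGetD ((PySem.List.pyRange 0 (N : Int) 1).flatMap
        (fun c => List.filterMap (fun r => if P r c then some c else none)
          (PySem.List.pyRange 0 (M : Int) 1))) (k : Int) 0 = ((pickIdx fCol N 0 k : Nat) : Int) := by
      rw [PySem.List.pyGetD_natCast]
      have := pos_get (fun c => List.filterMap (fun r => if P r c then some c else none)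
          (PySem.List.pyRange 0 (M : Int) 1)) fCol N hgC N 0 k (by omega)
        (by simp only [prefF]; omega)
      simpa using this
    rw [hBrow, hBcol]
    have hArow : (scanLoopA (List.map (fun i => ((fRow i : Nat) : Int)) (List.range M)) (TN : Int)
        (PySem.List.pyRange 1 (M : Int) 1) (((fRow 0 : Nat) : Int), 0)).2
        = ((pick2f TN fRow (M - 1) 1 (fRow 0) : Nat) : Int) := by
      have := scan_eq_pick2f fRow M TN (M - 1) 1 (fRow 0) (le_refl 1) (by omega)
      simpa using this
    have hAcol : (scanLoopA (List.map (fun j => ((fCol j : Nat) : Int)) (List.range N)) (TN : Int)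
        (PySem.List.pyRange 1 (N : Int) 1) (((fCol 0 : Nat) : Int), 0)).2
        = ((pick2f TN fCol (N - 1) 1 (fCol 0) : Nat) : Int) := by
      have := scan_eq_pick2f fCol N TN (N - 1) 1 (fCol 0) (le_refl 1) (by omega)
      simpa using this
    rw [hArow, hAcol]
    have hbridgeR : pick2f TN fRow (M - 1) 1 (fRow 0) = pickIdx fRow M 0 k := by
      have := pick2f_eq_pickIdx fRow M TN k hTN hTN1 hk (M - 1) 1 (le_refl 1) (by omega)
        (by simp [prefF])
      simp only [show (1:Nat) - 1 = 0 from rfl, show prefF fRow 1 = fRow 0 by simp [prefF],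
        show prefF fRow 0 = 0 from rfl, Nat.sub_zero, show M - 1 + 1 = M by omega] at this
      exact this
    have hbridgeC : pick2f TN fCol (N - 1) 1 (fCol 0) = pickIdx fCol N 0 k := by
      have := pick2f_eq_pickIdx fCol N TN k hTNcol hTN1 hk (N - 1) 1 (le_refl 1) (by omega)
        (by simp [prefF])
      simp only [show (1:Nat) - 1 = 0 from rfl, show prefF fCol 1 = fCol 0 by simp [prefF],
        show prefF fCol 0 = 0 from rfl, Nat.sub_zero, show N - 1 + 1 = N by omega] at this
      exact this
    rw [hbridgeR, hbridgeC]


-- ===== VERDICT (by name: the statement is the Claim_ definition above) =====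
theorem findPoint_spec : Claim_equal_findPoint := by
  intro grid _hdom hpre
  exact findPoint_eq_alt grid hpre.1 hpre.2.1
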